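-- pv_equiv track=rewrite | github.com/AdamZhouSE/pythonHomework | Code/CodeRecords/2884/60693/257447.py | spy_unit
-- ===== SOURCE A (Python) =====
-- from collections import defaultdict
--
-- def spy_unit(heights,n,k):
--     dict=defaultdict(list)
--     for i in range(n-1):
--         for j in range(i+1,n):
--             if abs(heights[i]-heights[j])<=k:
--                 dict[heights[i]].append(heights[j])
--                 dict[heights[j]].append(heights[i])
--     res=0
--     for key in dict.keys():
--         res+=len(dict.get(key))
--     return res
-- ===== SOURCE B (Python) =====
-- from collections import deque
--
-- def spy_unit(heights, n, k):
--     # Sort the first n heights, then slide a window (deque) over the sorted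
--     # list: for each x, the window holds exactly the earlier elements within k,
--     # so its length counts x's partners; doubling gives A's total.
--     if n <= 1 or k < 0:
--         return 0
--     xs = sorted(heights[:n])
--     total = 0
--     win = deque()
--     for x in xs:
--         while win and x - win[0] > k:
--             win.popleft()
--         total += len(win)
--         win.append(x)
--     return 2 * total
-- ===== Notes on version B (the rewrite author's own statement) =====
-- stated objective: faster
-- what changed: A scans all O(n^2) index pairs and accumulates matches in a defaultdict whose value-lengths it then sums; B sorts the first n heights and slides a deque window over the sorted list so each element's partners within k are counted in amortized O(1), returning twice the pair count.
-- outside the precondition, e.g. on spy_unit([1, 2], 3, 1): A raises IndexError, B returns 2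
import Mathlib
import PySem

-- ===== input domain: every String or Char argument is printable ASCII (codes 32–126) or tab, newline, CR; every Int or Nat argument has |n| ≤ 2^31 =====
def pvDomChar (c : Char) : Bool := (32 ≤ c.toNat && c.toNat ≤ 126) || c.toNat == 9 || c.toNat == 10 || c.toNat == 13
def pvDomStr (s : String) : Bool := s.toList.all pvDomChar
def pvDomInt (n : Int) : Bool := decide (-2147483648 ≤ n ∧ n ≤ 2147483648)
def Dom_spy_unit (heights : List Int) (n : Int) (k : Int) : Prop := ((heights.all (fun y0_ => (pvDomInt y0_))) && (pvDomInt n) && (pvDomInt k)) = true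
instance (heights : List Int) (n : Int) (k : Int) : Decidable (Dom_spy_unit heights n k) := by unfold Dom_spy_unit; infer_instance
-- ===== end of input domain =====

-- B replaces A's quadratic scan over all index pairs (grouped in a dict) by
-- sort + a sliding window that counts partners within k, doubled at the end.

-- ===== PORT A =====
def spy_unit (heights : List Int) (n : Int) (k : Int) : Int :=
  let d : PySem.Dict Int (List Int) :=
    (PySem.List.pyRange 0 (n - 1) 1).foldl (fun d i =>
      (PySem.List.pyRange (i + 1) n 1).foldl (fun d j =>
        if |PySem.List.pyGetD heights i 0 - PySem.List.pyGetD heights j 0| ≤ k then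
          (d.modify (PySem.List.pyGetD heights i 0) [] (· ++ [PySem.List.pyGetD heights j 0])).modify
            (PySem.List.pyGetD heights j 0) [] (· ++ [PySem.List.pyGetD heights i 0])
        else d) d)
      PySem.Dict.empty
  d.keys.foldl (fun res key => res + PySem.List.len ((d.get? key).getD [])) 0

-- ===== PORT B =====
-- the 'while win and x - win[0] > k: win.popleft()' loop of Source B
def pvShrink (k x : Int) : List Int → List Int
  | [] => []
  | w :: ws => if x - w > k then pvShrink k x ws else w :: ws

def spy_unit_alt (heights : List Int) (n : Int) (k : Int) : Int :=
  if n ≤ 1 ∨ k < 0 then 0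
  else
    let xs := PySem.List.sorted (PySem.List.slice heights none (some n)) (fun y => y) false
    let r := xs.foldl (fun (s : Int × List Int) x =>
      let win := pvShrink k x s.2
      (s.1 + PySem.List.len win, win ++ [x])) ((0 : Int), ([] : List Int))
    2 * r.1

-- ===== PRECONDITION & SPEC =====
-- Pre_ excludes exactly the inputs where A raises IndexError: n ≥ 2 with n exceeding len(heights).
def Pre_spy_unit (heights : List Int) (n : Int) (k : Int) : Prop :=
  n ≤ (heights.length : Int) ∨ n ≤ 1
instance (heights : List Int) (n : Int) (k : Int) : Decidable (Pre_spy_unit heights n k) := by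
  unfold Pre_spy_unit; infer_instance

def pvWitness_spy_unit : List Int × Int × Int := ([1, 2, 4], 3, 1)

def Spec_spy_unit (heights : List Int) (n : Int) (k : Int) (out : Int) : Prop := out = spy_unit_alt heights n k
instance (heights : List Int) (n : Int) (k : Int) (out : Int) : Decidable (Spec_spy_unit heights n k out) := by unfold Spec_spy_unit; infer_instance

-- ===== CLAIM (what is proved, stated in full; the proofs are below) =====
def Claim_equal_spy_unit : Prop := ∀ (heights : List Int) (n : Int) (k : Int), Dom_spy_unit heights n k → Pre_spy_unit heights n k → Spec_spy_unit heights n k (spy_unit heights n k)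

-- ===== LEMMAS AND PROOFS =====

def pvCntAbs (k x : Int) (l : List Int) : Nat :=
  l.countP (fun y => decide (|x - y| ≤ k))
def pvGAbs (k : Int) : List Int → Nat
  | [] => 0
  | x :: xs => pvCntAbs k x xs + pvGAbs k xs
def pvCross (k : Int) (q xs : List Int) : Nat :=
  (xs.map (fun y => (q.filter (fun w => decide (y - w ≤ k))).length)).sum
def pvGAcc (k : Int) : List Int → List Int → Nat
  | _, [] => 0
  | q, x :: xs => (q.filter (fun w => decide (x - w ≤ k))).length + pvGAcc k (q ++ [x]) xs

theorem pvGAbs_neg (k : Int) (l : List Int) (hk : k < 0) : pvGAbs k l = 0 := by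
  induction l with
  | nil => rfl
  | cons x xs ih =>
    simp only [pvGAbs, ih, Nat.add_zero, pvCntAbs]
    rw [List.countP_eq_zero]
    intro y _
    simp only [decide_eq_true_eq]
    intro hle
    exact absurd (le_trans (abs_nonneg _) hle) (not_le.mpr hk)

theorem pvGAbs_perm (k : Int) {xs ys : List Int} (h : xs.Perm ys) : pvGAbs k xs = pvGAbs k ys := by
  induction h with
  | nil => rfl
  | cons x _ ih => simp [pvGAbs, pvCntAbs, List.Perm.countP_eq _ (by assumption), ih]
  | swap x y l =>
    simp only [pvGAbs, pvCntAbs, List.countP_cons]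
    have : |y - x| = |x - y| := abs_sub_comm y x
    simp [this]
    omega
  | trans _ _ ih1 ih2 => exact ih1.trans ih2

theorem pvShrink_eq_filter (k x : Int) (win : List Int) (h : win.Pairwise (· ≤ ·)) :
    pvShrink k x win = win.filter (fun w => decide (x - w ≤ k)) := by
  induction win with
  | nil => rfl
  | cons w ws ih =>
    rcases List.pairwise_cons.mp h with ⟨hw, hws⟩
    by_cases hc : x - w > k
    · rw [pvShrink, if_pos hc, ih hws, List.filter_cons_of_neg (by simp; omega)]
    · have hxw : x - w ≤ k := by omega
      simp only [pvShrink, if_neg hc]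
      rw [List.filter_cons_of_pos (by simpa using hxw)]
      congr 1
      rw [eq_comm, List.filter_eq_self]
      intro y hy
      have := hw y hy
      simp only [decide_eq_true_eq]
      omega

theorem pvCross_append (k : Int) (q1 q2 xs : List Int) :
    pvCross k (q1 ++ q2) xs = pvCross k q1 xs + pvCross k q2 xs := by
  induction xs with
  | nil => rfl
  | cons y ys ih =>
    simp only [pvCross, List.map_cons, List.sum_cons, List.filter_append, List.length_append] at *
    omega

theorem pvCross_single (k x : Int) (xs : List Int) :
    pvCross k [x] xs = xs.countP (fun y => decide (y - x ≤ k)) := by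
  induction xs with
  | nil => rfl
  | cons y ys ih =>
    simp only [pvCross, List.map_cons, List.sum_cons, List.countP_cons] at *
    rw [ih.symm]
    by_cases hc : y - x ≤ k <;> simp [hc, List.filter]
    omega

theorem pvGAcc_decomp (k : Int) (xs : List Int) : ∀ q, pvGAcc k q xs = pvCross k q xs + pvGAcc k [] xs := by
  induction xs with
  | nil => intro q; rfl
  | cons x xs ih =>
    intro q
    simp only [pvGAcc, pvCross, List.map_cons, List.sum_cons]
    rw [ih (q ++ [x]), show pvGAcc k ([] ++ [x]) xs = pvGAcc k [x] xs by rfl, ih [x], pvCross_append]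
    simp only [List.filter_nil, List.length_nil, Nat.zero_add, pvCross]
    omega

theorem pvGAcc_nil_eq (k : Int) (xs : List Int) (h : xs.Pairwise (· ≤ ·)) :
    pvGAcc k [] xs = pvGAbs k xs := by
  induction xs with
  | nil => rfl
  | cons x xs ih =>
    rcases List.pairwise_cons.mp h with ⟨hx, hxs⟩
    simp only [pvGAcc, List.filter_nil, List.length_nil, Nat.zero_add, List.nil_append]
    rw [pvGAcc_decomp, pvCross_single, ih hxs]
    simp only [pvGAbs, pvCntAbs]
    congr 1
    apply List.countP_congr
    intro y hy
    have hxy := hx y hy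
    simp only [decide_eq_true_eq]
    rw [abs_sub_comm, abs_of_nonneg (by omega)]

theorem pvB_loop (k : Int) (hk : 0 ≤ k) (xs : List Int) :
    ∀ (q : List Int) (b t : Int), xs.Pairwise (· ≤ ·) → q.Pairwise (· ≤ ·) →
    (∀ w ∈ q, ∀ y ∈ xs, w ≤ y) → (∀ y ∈ xs, b ≤ y) →
    (xs.foldl (fun (s : Int × List Int) x =>
        let win := pvShrink k x s.2
        (s.1 + PySem.List.len win, win ++ [x]))
      (t, q.filter (fun w => decide (b - w ≤ k)))).1 = t + (pvGAcc k q xs : Int) := by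
  induction xs with
  | nil => intro q b t _ _ _ _; simp [pvGAcc]
  | cons x xs ih =>
    intro q b t hxs hq hqle hble
    rcases List.pairwise_cons.mp hxs with ⟨hxle, hxs'⟩
    have hbx : b ≤ x := hble x (List.mem_cons_self)
    have hqx : ∀ w ∈ q, w ≤ x := fun w hw => hqle w hw x (List.mem_cons_self)
    rw [List.foldl_cons]
    have hwin : pvShrink k x (q.filter (fun w => decide (b - w ≤ k)))
        = q.filter (fun w => decide (x - w ≤ k)) := by
      rw [pvShrink_eq_filter _ _ _ (List.Pairwise.filter _ hq), List.filter_filter]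
      apply List.filter_congr
      intro w hw
      by_cases h1 : x - w ≤ k
      · simp [h1, show b - w ≤ k by omega]
      · simp [h1]
    have hnext : q.filter (fun w => decide (x - w ≤ k)) ++ [x]
        = (q ++ [x]).filter (fun w => decide (x - w ≤ k)) := by
      rw [List.filter_append, List.filter_cons_of_pos (by simp; omega), List.filter_nil]
    simp only [hwin, hnext]
    rw [ih (q ++ [x]) x (t + PySem.List.len (q.filter (fun w => decide (x - w ≤ k)))) hxs'
        (by rw [List.pairwise_append]; exact ⟨hq, List.pairwise_singleton _ _,
              fun w hw y hy => by simp at hy; subst hy; exact hqx w hw⟩)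
        (by intro w hw y hy
            rcases List.mem_append.mp hw with h | h
            · exact hqle w h y (List.mem_cons_of_mem _ hy)
            · simp at h; subst h; exact hxle y hy)
        hxle]
    simp only [pvGAcc, PySem.List.len_eq]
    push_cast
    ring

def pvE (heights : List Int) (n k : Int) : List (Int × Int) :=
  (PySem.List.pyRange 0 (n - 1) 1).flatMap (fun i =>
    ((PySem.List.pyRange (i + 1) n 1).filter
        (fun j => decide (|PySem.List.pyGetD heights i 0 - PySem.List.pyGetD heights j 0| ≤ k))).flatMap
      (fun j => [(PySem.List.pyGetD heights i 0, PySem.List.pyGetD heights j 0),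
                 (PySem.List.pyGetD heights j 0, PySem.List.pyGetD heights i 0)]))


theorem pvA_dict (heights : List Int) (n k : Int) :
    ((PySem.List.pyRange 0 (n - 1) 1).foldl (fun d i =>
      (PySem.List.pyRange (i + 1) n 1).foldl (fun d j =>
        if |PySem.List.pyGetD heights i 0 - PySem.List.pyGetD heights j 0| ≤ k then
          (d.modify (PySem.List.pyGetD heights i 0) [] (· ++ [PySem.List.pyGetD heights j 0])).modify
            (PySem.List.pyGetD heights j 0) [] (· ++ [PySem.List.pyGetD heights i 0])
        else d) d)
      (PySem.Dict.empty : PySem.Dict Int (List Int)))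
    = (pvE heights n k).foldl (fun d p => d.modify p.1 [] (· ++ [p.2])) PySem.Dict.empty := by
  rw [pvE, List.foldl_flatMap]
  apply PySem.List.foldl_congr_mem
  intro d i _
  rw [List.foldl_flatMap]
  rw [← PySem.List.foldl_ite_eq_foldl_filter
      (p := fun j => |PySem.List.pyGetD heights i 0 - PySem.List.pyGetD heights j 0| ≤ k)]
  apply PySem.List.foldl_congr_mem
  intro d' j _
  by_cases hc : |PySem.List.pyGetD heights i 0 - PySem.List.pyGetD heights j 0| ≤ k
  · simp [hc, List.foldl]
  · simp [hc]

theorem pvSumCast {α : Type} (l : List α) (f : α → Nat) :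
    (l.map (fun x => ((f x : Nat) : Int))).sum = ((l.map f).sum : Int) := by
  induction l with
  | nil => rfl
  | cons x xs ih => simp [ih]

theorem pvA_res (heights : List Int) (n k : Int) :
    spy_unit heights n k = ((pvE heights n k).length : Int) := by
  rw [spy_unit]
  simp only [pvA_dict]
  rw [PySem.List.foldl_add]
  set E := pvE heights n k with hE
  set D := E.foldl (fun d p => d.modify p.1 [] (· ++ [p.2])) (PySem.Dict.empty : PySem.Dict Int (List Int)) with hD
  have hkeys : D.keys = PySem.Set.ofList (E.map Prod.fst) := by
    rw [hD, PySem.Dict.keys_foldl_modify_key]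
    simp [PySem.Set.update_nil_left]
  have hval : ∀ c : Int, (D.get? c).getD [] = (E.filter (fun p => p.1 == c)).map Prod.snd := by
    intro c
    rw [← PySem.Dict.getD_eq_get?_getD, hD, PySem.Dict.getD_foldl_modify_append]
    simp
  have hmap : ∀ c : Int, PySem.List.len ((D.get? c).getD []) = ((E.map Prod.fst).count c : Int) := by
    intro c
    rw [hval c]
    simp only [PySem.List.len_eq, List.length_map]
    rw [List.count_eq_countP, List.countP_map, ← List.countP_eq_length_filter]
    rfl
  calc (0 : Int) + (D.keys.map (fun key => PySem.List.len ((D.get? key).getD []))).sum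
      = ((PySem.Set.ofList (E.map Prod.fst)).map (fun c => (((E.map Prod.fst).count c : Nat) : Int))).sum := by
        rw [hkeys]; rw [zero_add]; congr 1; apply List.map_congr_left; intro c _; exact hmap c
    _ = (((PySem.Set.ofList (E.map Prod.fst)).map (fun c => (E.map Prod.fst).count c)).sum : Int) := by
        rw [pvSumCast]
    _ = (((E.map Prod.fst).dedup.map (fun c => (E.map Prod.fst).count c)).sum : Int) := by
        congr 1
        apply List.Perm.sum_eq
        apply List.Perm.map
        rw [List.perm_ext_iff_of_nodup (PySem.Set.nodup_ofList _) (List.nodup_dedup _)]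
        intro a
        rw [PySem.Set.mem_ofList, List.mem_dedup]
    _ = ((E.map Prod.fst).length : Int) := by rw [List.sum_map_count_dedup_eq_length]
    _ = (E.length : Int) := by rw [List.length_map]

theorem pvGetDshift (x : Int) (t : List Int) (i : Int) (h : 0 ≤ i) :
    PySem.List.pyGetD (x :: t) (i + 1) 0 = PySem.List.pyGetD t i 0 := by
  obtain ⟨m, rfl⟩ : ∃ m : Nat, i = (m : Int) := ⟨i.toNat, (Int.toNat_of_nonneg h).symm⟩
  rw [show ((m : Int) + 1) = ((m + 1 : Nat) : Int) by push_cast; ring]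
  rw [PySem.List.pyGetD_natCast, PySem.List.pyGetD_natCast, List.getD_cons_succ]

theorem pvShiftSum (f : Int → Nat) (a b : Int) :
    ((PySem.List.pyRange (a + 1) (b + 1) 1).map f).sum
      = ((PySem.List.pyRange a b 1).map (fun i => f (i + 1))).sum := by
  rw [PySem.List.pyRange_one, PySem.List.pyRange_one, List.map_map, List.map_map]
  have : (b + 1 - (a + 1)) = b - a := by ring
  rw [this]
  congr 1
  apply List.map_congr_left
  intro c _
  simp only [Function.comp_apply]
  have h : a + 1 + (c : Int) = a + (c : Int) + 1 := by ring
  rw [h]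

theorem pvShiftCount (p : Int → Bool) (a b : Int) :
    (PySem.List.pyRange (a + 1) (b + 1) 1).countP p
      = (PySem.List.pyRange a b 1).countP (fun j => p (j + 1)) := by
  rw [PySem.List.pyRange_one, PySem.List.pyRange_one, List.countP_map, List.countP_map]
  have : (b + 1 - (a + 1)) = b - a := by ring
  rw [this]
  apply List.countP_congr
  intro c _
  simp only [Function.comp_apply]
  have h : a + 1 + (c : Int) = a + (c : Int) + 1 := by ring
  rw [h]

theorem pvIdxSum (k : Int) (xs : List Int) :
    ((PySem.List.pyRange 0 ((xs.length : Int) - 1) 1).map (fun i =>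
        (PySem.List.pyRange (i + 1) (xs.length : Int) 1).countP
          (fun j => decide (|PySem.List.pyGetD xs i 0 - PySem.List.pyGetD xs j 0| ≤ k)))).sum
    = pvGAbs k xs := by
  induction xs with
  | nil => rw [PySem.List.pyRange_one_eq_nil (by simp)]; rfl
  | cons x t ih =>
    rcases List.eq_nil_or_concat' t with rfl | _
    case inl =>
      rw [PySem.List.pyRange_one_eq_nil (by simp)]
      simp [pvGAbs, pvCntAbs]
    have hpos : 0 < t.length := by
      rcases t with _ | _
      · simp_all
      · simp
    have hL1 : (1 : Int) ≤ (t.length : Int) := by exact_mod_cast hpos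
    have hlen : ((x :: t).length : Int) = (t.length : Int) + 1 := by simp
    rw [hlen]
    have hb : ((t.length : Int) + 1 - 1) = (t.length : Int) := by ring
    rw [hb, PySem.List.pyRange_one_cons (by omega), List.map_cons, List.sum_cons]
    have hhead : (PySem.List.pyRange (0 + 1) ((t.length : Int) + 1) 1).countP
          (fun j => decide (|PySem.List.pyGetD (x :: t) 0 0 - PySem.List.pyGetD (x :: t) j 0| ≤ k))
        = pvCntAbs k x t := by
      rw [PySem.List.pyGetD_zero_cons]
      rw [show ((t.length : Int) + 1) = ((x :: t).length : Int) by simp]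
      rw [show (PySem.List.pyRange (0 + 1) ((x :: t).length : Int) 1).countP
            (fun j => decide (|x - PySem.List.pyGetD (x :: t) j 0| ≤ k))
          = ((PySem.List.pyRange (0 + 1) ((x :: t).length : Int) 1).map
              (fun j => PySem.List.pyGetD (x :: t) j 0)).countP
              (fun y => decide (|x - y| ≤ k)) by rw [List.countP_map]; rfl]
      rw [PySem.List.map_pyGetD_pyRange' (x :: t) 0 (by omega)]
      rfl
    have htail : ((PySem.List.pyRange (0 + 1) (t.length : Int) 1).map (fun i =>
          (PySem.List.pyRange (i + 1) ((t.length : Int) + 1) 1).countP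
            (fun j => decide (|PySem.List.pyGetD (x :: t) i 0 - PySem.List.pyGetD (x :: t) j 0| ≤ k)))).sum
        = pvGAbs k t := by
      rw [show (t.length : Int) = ((t.length : Int) - 1) + 1 by ring] -- shift outer range
      rw [pvShiftSum (a := 0) (b := (t.length : Int) - 1)]
      rw [show (((t.length : Int) - 1) + 1) = (t.length : Int) by ring]
      rw [← ih]
      congr 1
      apply List.map_congr_left
      intro i hi
      have hi' : 0 ≤ i ∧ i < (t.length : Int) - 1 := by
        rw [PySem.List.mem_pyRange_one] at hi; exact hi
      rw [pvGetDshift x t i hi'.1]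
      rw [show (i + 1 + 1) = ((i + 1) + 1) by ring,
          show ((t.length : Int) + 1) = ((t.length : Int)) + 1 by ring,
          pvShiftCount]
      apply List.countP_congr
      intro j hj
      have hj' : i + 1 ≤ j := (PySem.List.mem_pyRange_one.mp hj).1
      rw [pvGetDshift x t j (by omega)]
    rw [hhead, htail]
    rfl

theorem pvLen2 {α β : Type} (l : List α) (f g : α → β) :
    (l.flatMap (fun j => [f j, g j])).length = 2 * l.length := by
  induction l with
  | nil => rfl
  | cons a l ih => simp [List.flatMap_cons, ih]; omega

theorem pvSum2 {α : Type} (l : List α) (f : α → Nat) :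
    (l.map (fun x => 2 * f x)).sum = 2 * (l.map f).sum := by
  induction l with
  | nil => rfl
  | cons a l ih => simp [ih]; omega

theorem pvGetD_take (heights : List Int) (n i : Int) (h0 : 0 ≤ i) (h1 : i < n)
    (h2 : n ≤ (heights.length : Int)) :
    PySem.List.pyGetD heights i 0 = PySem.List.pyGetD (heights.take n.toNat) i 0 := by
  have hi : i < (heights.length : Int) := lt_of_lt_of_le h1 h2
  have hlt : i.toNat < heights.length := by omega
  have hlt2 : i.toNat < (heights.take n.toNat).length := by
    rw [List.length_take]; omega
  rw [PySem.List.pyGetD_eq_getElem heights 0 h0 (by exact_mod_cast hi),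
      PySem.List.pyGetD_eq_getElem (heights.take n.toNat) 0 h0 (by rw [List.length_take]; omega)]
  simp [List.getElem_take]

theorem pvA_len (heights : List Int) (n k : Int) (h2 : 2 ≤ n) (hlen : n ≤ (heights.length : Int)) :
    (pvE heights n k).length = 2 * pvGAbs k (heights.take n.toNat) := by
  have hxlen : ((heights.take n.toNat).length : Int) = n := by
    rw [List.length_take]; omega
  rw [pvE, List.length_flatMap]
  have hstep : ∀ i ∈ PySem.List.pyRange 0 (n - 1) 1,
      (((PySem.List.pyRange (i + 1) n 1).filter
          (fun j => decide (|PySem.List.pyGetD heights i 0 - PySem.List.pyGetD heights j 0| ≤ k))).flatMap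
        (fun j => [(PySem.List.pyGetD heights i 0, PySem.List.pyGetD heights j 0),
                   (PySem.List.pyGetD heights j 0, PySem.List.pyGetD heights i 0)])).length
      = 2 * ((PySem.List.pyRange (i + 1) n 1).countP
          (fun j => decide (|PySem.List.pyGetD (heights.take n.toNat) i 0
            - PySem.List.pyGetD (heights.take n.toNat) j 0| ≤ k))) := by
    intro i hi
    have hi' := PySem.List.mem_pyRange_one.mp hi
    rw [pvLen2, ← List.countP_eq_length_filter]
    congr 1
    apply List.countP_congr
    intro j hj
    have hj' := PySem.List.mem_pyRange_one.mp hj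
    rw [pvGetD_take heights n i hi'.1 (by omega) hlen,
        pvGetD_take heights n j (by omega) (by omega) hlen]
  rw [List.map_congr_left hstep, pvSum2]
  congr 1
  have h := pvIdxSum k (heights.take n.toNat)
  rw [hxlen] at h
  exact h


theorem spy_unit_small (heights : List Int) (n k : Int) (h : n ≤ 1) : spy_unit heights n k = 0 := by
  rw [spy_unit, PySem.List.pyRange_one_eq_nil (by omega)]
  rfl

theorem spy_unit_main (heights : List Int) (n k : Int) :
    Pre_spy_unit heights n k → spy_unit heights n k = spy_unit_alt heights n k := by
  intro hpre
  by_cases hsm : n ≤ 1 ∨ k < 0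
  · rw [spy_unit_alt, if_pos hsm]
    rcases hsm with h | h
    · exact spy_unit_small heights n k h
    · by_cases hn : n ≤ 1
      · exact spy_unit_small heights n k hn
      · have hlen : n ≤ (heights.length : Int) := hpre.resolve_right hn
        rw [pvA_res, pvA_len heights n k (by omega) hlen, pvGAbs_neg k _ h]
        rfl
  · rw [spy_unit_alt, if_neg hsm]
    simp only [not_or, not_le, not_lt] at hsm
    obtain ⟨hn, hk⟩ := hsm
    have hlen : n ≤ (heights.length : Int) := hpre.resolve_right (by omega)
    rw [PySem.List.slice_to heights (by omega)]
    set xs := PySem.List.sorted (heights.take n.toNat) (fun y => y) false with hxs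
    have hsorted : xs.Pairwise (· ≤ ·) := PySem.List.sorted_pairwise (heights.take n.toNat) (fun y => y)
    have hperm : xs.Perm (heights.take n.toNat) := PySem.List.sorted_perm _ _ _
    have hble : ∀ y ∈ xs, xs.headD 0 ≤ y := by
      cases h : xs with
      | nil => simp
      | cons a t =>
        intro y hy
        rcases List.mem_cons.mp hy with rfl | hy'
        · simp
        · simpa using (List.pairwise_cons.mp (h ▸ hsorted)).1 y hy'
    have hB := pvB_loop k hk xs [] (xs.headD 0) 0 hsorted List.Pairwise.nil (by simp) hble
    simp only [List.filter_nil] at hB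
    show spy_unit heights n k = 2 * (xs.foldl (fun (s : Int × List Int) x =>
      let win := pvShrink k x s.2
      (s.1 + PySem.List.len win, win ++ [x])) ((0 : Int), ([] : List Int))).1
    rw [hB, pvGAcc_nil_eq k xs hsorted, pvA_res, pvA_len heights n k (by omega) hlen,
        pvGAbs_perm k hperm.symm]
    push_cast
    ring

-- ===== VERDICT (by name: the statement is the Claim_ definition above) =====
theorem spy_unit_spec : Claim_equal_spy_unit := by
  intro heights n k _ hpre
  unfold Spec_spy_unit
  exact spy_unit_main heights n k hpre
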